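-- pv_equiv track=rewrite | github.com/hundredthtree-OvO/myEmbodiedVLA-agent | src/study_agent/ingest.py | _deployment_entry_score
-- ===== SOURCE A (Python) =====
-- def _deployment_entry_score(path: str, reasons: list[str]) -> int:
--     score = 0
--     for reason in reasons:
--         if reason == "deployment_group":
--             score += 5
--         elif reason == "runtime_namespace":
--             score += 4
--         elif reason.startswith("deployment_token:"):
--             score += 2
--     return score
-- ===== SOURCE B (Python) =====
-- def _deployment_entry_score(path: str, reasons: list[str]) -> int:
--     counts = {}
--     for reason in reasons:
--         counts[reason] = counts.get(reason, 0) + 1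
--     total = 0
--     for reason, count in counts.items():
--         if reason == "deployment_group":
--             total += count * 5
--         elif reason == "runtime_namespace":
--             total += count * 4
--         elif reason.startswith("deployment_token:"):
--             total += count * 2
--     return total
-- ===== Notes on version B (the rewrite author's own statement) =====
-- stated objective: alternative
-- what changed: B first tabulates the reasons into a frequency dictionary and then reduces over the distinct (reason, count) pairs adding count*weight, instead of A's per-element accumulation.
import Mathlib
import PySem

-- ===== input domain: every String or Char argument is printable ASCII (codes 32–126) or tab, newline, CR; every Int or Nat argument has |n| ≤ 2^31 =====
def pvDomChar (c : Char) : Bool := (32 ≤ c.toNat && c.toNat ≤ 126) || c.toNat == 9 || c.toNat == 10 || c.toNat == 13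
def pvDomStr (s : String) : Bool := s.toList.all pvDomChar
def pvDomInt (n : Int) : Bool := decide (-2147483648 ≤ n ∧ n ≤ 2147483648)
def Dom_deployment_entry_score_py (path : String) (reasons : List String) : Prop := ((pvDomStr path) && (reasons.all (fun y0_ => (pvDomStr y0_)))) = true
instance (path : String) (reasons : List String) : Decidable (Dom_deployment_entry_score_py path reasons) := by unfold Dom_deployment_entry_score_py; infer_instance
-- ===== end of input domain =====

-- B tabulates the reasons into a frequency dictionary and reduces over distinct (reason, count) pairs; same cost, alternative structure.

-- ===== PORT A =====
-- A: one pass over reasons, adding 5/4/2 per element by category.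
def deployment_entry_score_py (path : String) (reasons : List String) : Int :=
  reasons.foldl (fun score reason =>
    if reason == "deployment_group" then score + 5
    else if reason == "runtime_namespace" then score + 4
    else if PySem.Str.startswith reason "deployment_token:" then score + 2
    else score) 0

-- ===== PORT B =====
-- B: build counts = {reason: multiplicity} first, then sum count * weight over its items.
def deployment_entry_score_py_alt (path : String) (reasons : List String) : Int :=
  let counts := reasons.foldl (fun d reason => d.insert reason (d.getD reason 0 + 1)) PySem.Dict.empty
  counts.items.foldl (fun total p =>
    if p.1 == "deployment_group" then total + p.2 * 5
    else if p.1 == "runtime_namespace" then total + p.2 * 4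
    else if PySem.Str.startswith p.1 "deployment_token:" then total + p.2 * 2
    else total) 0

-- ===== PRECONDITION & SPEC =====
def Spec_deployment_entry_score_py (path : String) (reasons : List String) (out : Int) : Prop := out = deployment_entry_score_py_alt path reasons
instance (path : String) (reasons : List String) (out : Int) : Decidable (Spec_deployment_entry_score_py path reasons out) := by unfold Spec_deployment_entry_score_py; infer_instance

-- ===== CLAIM (what is proved, stated in full; the proofs are below) =====
def Claim_equal_deployment_entry_score_py : Prop := ∀ (path : String) (reasons : List String), Dom_deployment_entry_score_py path reasons → Spec_deployment_entry_score_py path reasons (deployment_entry_score_py path reasons)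

-- ===== LEMMAS AND PROOFS =====

-- the per-reason weight both programs score with
def pvWeight (r : String) : Int :=
  if r == "deployment_group" then 5
  else if r == "runtime_namespace" then 4
  else if PySem.Str.startswith r "deployment_token:" then 2
  else 0

theorem pvA_foldl (l : List String) (init : Int) :
    l.foldl (fun score reason =>
      if reason == "deployment_group" then score + 5
      else if reason == "runtime_namespace" then score + 4
      else if PySem.Str.startswith reason "deployment_token:" then score + 2
      else score) init = init + (l.map pvWeight).sum := by
  induction l generalizing init with
  | nil => simp
  | cons x xs ih =>
    simp only [List.foldl_cons, List.map_cons, List.sum_cons, ih, pvWeight]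
    split_ifs <;> ring

theorem pvB_foldl (l : List (String × Int)) (init : Int) :
    l.foldl (fun total p =>
      if p.1 == "deployment_group" then total + p.2 * 5
      else if p.1 == "runtime_namespace" then total + p.2 * 4
      else if PySem.Str.startswith p.1 "deployment_token:" then total + p.2 * 2
      else total) init = init + (l.map (fun p => p.2 * pvWeight p.1)).sum := by
  induction l generalizing init with
  | nil => simp
  | cons x xs ih =>
    simp only [List.foldl_cons, List.map_cons, List.sum_cons, ih, pvWeight]
    split_ifs <;> ring

-- in a Nodup list containing x, a sum of 'if k = x then c k else 0' picks out c x
theorem pvSum_pick (l : List String) (x : String) (c : String → Int)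
    (hnd : l.Nodup) (hx : x ∈ l) :
    (l.map (fun k => if k = x then c k else 0)).sum = c x := by
  induction l with
  | nil => simp at hx
  | cons y ys ih =>
    obtain ⟨hny, hnd'⟩ := List.nodup_cons.mp hnd
    simp only [List.map_cons, List.sum_cons]
    rcases List.mem_cons.mp hx with h | h
    · have hz : ∀ k ∈ ys, (if k = x then c k else 0) = 0 := by
        intro k hk
        have hk' : k ≠ x := fun e => hny (h ▸ e ▸ hk)
        simp [hk']
      rw [List.sum_eq_zero (by simpa using hz)]
      have hyx : y = x := h.symm
      simp [hyx]
    · have hne : y ≠ x := fun e => hny (e ▸ h)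
      rw [ih hnd' h]
      simp [hne]

-- tabulate-then-reduce equals per-element accumulation
theorem pvCount_sum (d : List String) (xs : List String)
    (hnd : d.Nodup) (hsub : ∀ x ∈ xs, x ∈ d) :
    (d.map (fun k => (xs.count k : Int) * pvWeight k)).sum = (xs.map pvWeight).sum := by
  induction xs with
  | nil => simp [List.sum_eq_zero]
  | cons x xs ih =>
    have hx : x ∈ d := hsub x (by simp)
    have step : ∀ k, ((x :: xs).count k : Int) * pvWeight k
        = (xs.count k : Int) * pvWeight k + (if k = x then pvWeight k else 0) := by
      intro k
      by_cases h : x = k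
      · subst h; simp; ring
      · have h' : k ≠ x := fun e => h e.symm
        simp [h, h']
    calc (d.map (fun k => ((x :: xs).count k : Int) * pvWeight k)).sum
        = (d.map (fun k => (xs.count k : Int) * pvWeight k + (if k = x then pvWeight k else 0))).sum := by
          simp only [step]
      _ = (d.map (fun k => (xs.count k : Int) * pvWeight k)).sum
            + (d.map (fun k => if k = x then pvWeight k else 0)).sum := by
          rw [← List.sum_map_add]
      _ = (xs.map pvWeight).sum + pvWeight x := by
          rw [ih (fun y hy => hsub y (by simp [hy])), pvSum_pick d x pvWeight hnd hx]
      _ = ((x :: xs).map pvWeight).sum := by simp; ring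

-- ===== VERDICT (by name: the statement is the Claim_ definition above) =====
theorem deployment_entry_score_py_spec : Claim_equal_deployment_entry_score_py := by
  intro path reasons _
  show deployment_entry_score_py path reasons = deployment_entry_score_py_alt path reasons
  unfold deployment_entry_score_py deployment_entry_score_py_alt
  rw [pvA_foldl, PySem.Dict.foldl_insert_getD_add_one_eq_counter, pvB_foldl,
      PySem.Dict.items_counter, List.map_map]
  simp only [Function.comp_def]
  rw [pvCount_sum (PySem.Set.ofList reasons) reasons (PySem.Set.nodup_ofList reasons)
      (fun x hx => (PySem.Set.mem_ofList reasons x).mpr hx)]
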